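-- pv_equiv track=rewrite | github.com/qiime/FastUnifrac | fastunifrac/newick_to_asciiArt.py | remove_first_chars_of_html_string
-- ===== SOURCE A (Python) =====
-- def remove_first_chars_of_html_string(html_string, num_chars):
--     """Removes the X first chars of an HTML string
--
--     Inputs:
--         html_string: string which contains the html code to modify
--         num_chars: number of chars to remove
--
--     Returns the 'html_string' string but removing the 'num_chars' first chars
--         taking in account the html tags
--     """
--     if len(html_string) == 0:
--         return ""
--     if num_chars == 0:
--         return html_string
--     if html_string[0] == "<":
--         left, sep, right = html_string.partition("</a>")
--         return remove_first_chars_of_html_string(right, num_chars - 1)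
--     return remove_first_chars_of_html_string(html_string[1:], num_chars - 1)
-- ===== SOURCE B (Python) =====
-- def remove_first_chars_of_html_string(html_string, num_chars):
--     """Two-phase rewrite: first tokenize the string once into the start offsets
--     of its logical units (a unit is a '<'-initiated block running through the
--     next '</a>', or a single ordinary char), then answer by indexing into that
--     offset table and slicing once."""
--     n = len(html_string)
--     starts = []
--     i = 0
--     while i < n:
--         starts.append(i)
--         if html_string[i] == "<":
--             j = html_string.find("</a>", i)
--             i = n if j == -1 else j + 4
--         else:
--             i += 1
--     if num_chars == 0:
--         return html_string
--     if 0 < num_chars < len(starts):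
--         return html_string[starts[num_chars]:]
--     return ""
-- ===== Notes on version B (the rewrite author's own statement) =====
-- stated objective: faster
-- what changed: Replaced A's recursion that rebuilds a suffix string per removed logical char with a two-phase algorithm: one linear tokenization pass that records the start offset of every logical unit into a table, followed by a single table lookup and one final slice.
import Mathlib
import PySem

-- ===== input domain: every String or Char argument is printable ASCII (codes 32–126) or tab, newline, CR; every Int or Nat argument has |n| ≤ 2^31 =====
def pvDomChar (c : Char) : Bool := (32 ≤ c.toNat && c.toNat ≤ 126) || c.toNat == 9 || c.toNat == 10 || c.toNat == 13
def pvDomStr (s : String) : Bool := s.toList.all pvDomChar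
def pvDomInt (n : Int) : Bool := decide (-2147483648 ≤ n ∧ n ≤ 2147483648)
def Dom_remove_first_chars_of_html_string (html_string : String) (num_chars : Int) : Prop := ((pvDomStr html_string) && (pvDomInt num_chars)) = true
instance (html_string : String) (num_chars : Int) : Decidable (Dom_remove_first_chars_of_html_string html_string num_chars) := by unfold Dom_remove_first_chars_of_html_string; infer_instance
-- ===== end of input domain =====

-- B replaces A's per-character suffix rebuilding (recursion with partition/slicing)
-- by one tokenization pass producing a table of unit start offsets plus one
-- lookup and one final slice; objective: faster (asymptotic).

-- ===== PORT A =====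
-- step-for-step port of A's recursion, over List Char, with a structural fuel
-- guard (length+1 steps always suffice: every recursive call strictly shortens
-- the list; the fuel-0 branch is unreachable from the top-level call).
-- `partition("</a>")` is ported by hand (exact): find the first occurrence,
-- `right` is what follows it (empty when absent) — A only uses `right`.
def pvTag : List Char := ['<', '/', 'a', '>']

def pvRecA : Nat → List Char → Int → List Char
  | 0, _, _ => []
  | fuel + 1, s, n =>
    if s.length = 0 then []
    else if n = 0 then s
    else if s.head? = some '<' then
      let f := PySem.Chars.find s pvTag
      let right := if f = -1 then [] else s.drop (f.toNat + 4)
      pvRecA fuel right (n - 1)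
    else pvRecA fuel (s.drop 1) (n - 1)

def remove_first_chars_of_html_string (html_string : String) (num_chars : Int) : String :=
  String.ofList (pvRecA (html_string.toList.length + 1) html_string.toList num_chars)

-- ===== PORT B =====
-- Source B phase 1: the while loop appending unit start offsets; the loop body's
-- cursor update is the helper pvNextB, `str.find("</a>", i)` is
-- PySem.Chars.findFrom. The recursion builds the same list the loop appends.
def pvNextB (s : List Char) (i : Nat) : Nat :=
  if s[i]? = some '<' then
    let j := PySem.Chars.findFrom s pvTag (i : Int) none
    if j = -1 then s.length else j.toNat + 4
  else i + 1

lemma pvNextB_gt (s : List Char) (i : Nat) (h : i < s.length) : i < pvNextB s i := by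
  unfold pvNextB
  by_cases hc : s[i]? = some '<'
  · rw [if_pos hc, PySem.Chars.findFrom_natCast s pvTag i (Nat.le_of_lt h)]
    by_cases hmiss : PySem.Chars.find (s.drop i) pvTag = -1
    · simp only [hmiss, reduceIte]; exact h
    · have := PySem.Chars.neg_one_le_find (s.drop i) pvTag
      have hne : ¬ ((i : Int) + PySem.Chars.find (s.drop i) pvTag = -1) := by omega
      simp only [if_neg hmiss, if_neg hne]
      omega
  · rw [if_neg hc]
    omega

def pvStartsB (s : List Char) (i : Nat) : List Nat :=
  if h : i < s.length then i :: pvStartsB s (pvNextB s i) else []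
termination_by s.length - i
decreasing_by have := pvNextB_gt s i h; omega

-- Source B phase 2: the three-way return on num_chars and the offset table.
def remove_first_chars_of_html_string_alt (html_string : String) (num_chars : Int) : String :=
  let L := html_string.toList
  let starts := pvStartsB L 0
  if num_chars = 0 then html_string
  else if 0 < num_chars ∧ num_chars < (starts.length : Int) then
    String.ofList (L.drop (starts.getD num_chars.toNat 0))
  else ""

-- ===== PRECONDITION & SPEC =====
def Spec_remove_first_chars_of_html_string (html_string : String) (num_chars : Int) (out : String) : Prop := out = remove_first_chars_of_html_string_alt html_string num_chars
instance (html_string : String) (num_chars : Int) (out : String) : Decidable (Spec_remove_first_chars_of_html_string html_string num_chars out) := by unfold Spec_remove_first_chars_of_html_string; infer_instance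

-- ===== CLAIM (what is proved, stated in full; the proofs are below) =====
def Claim_equal_remove_first_chars_of_html_string : Prop := ∀ (html_string : String) (num_chars : Int), Dom_remove_first_chars_of_html_string html_string num_chars → Spec_remove_first_chars_of_html_string html_string num_chars (remove_first_chars_of_html_string html_string num_chars)

-- ===== LEMMAS AND PROOFS =====
lemma pvRecA_nil (fuel : Nat) (n : Int) : pvRecA fuel [] n = [] := by
  cases fuel <;> simp [pvRecA]

-- One unit of A's recursion consumes exactly the segment [i, pvNextB s i).
lemma pvRecA_step (s : List Char) (fuel : Nat) (i : Nat) (rem : Int)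
    (hi : i < s.length) (hr : rem ≠ 0) :
    pvRecA (fuel + 1) (s.drop i) rem = pvRecA fuel (s.drop (pvNextB s i)) (rem - 1) := by
  have hlen : ¬ (s.drop i).length = 0 := by simp only [List.length_drop]; omega
  rw [pvRecA, if_neg hlen, if_neg hr]
  have hhead : (s.drop i).head? = s[i]? := List.head?_drop ..
  rw [hhead]
  unfold pvNextB
  by_cases hc : s[i]? = some '<'
  · rw [if_pos hc, if_pos hc, PySem.Chars.findFrom_natCast s pvTag i (Nat.le_of_lt hi)]
    by_cases hmiss : PySem.Chars.find (s.drop i) pvTag = -1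
    · simp only [hmiss, reduceIte, List.drop_length]
    · have hpos : 0 ≤ PySem.Chars.find (s.drop i) pvTag := by
        have := PySem.Chars.neg_one_le_find (s.drop i) pvTag; omega
      have hne' : ¬ ((i : Int) + PySem.Chars.find (s.drop i) pvTag = -1) := by omega
      simp only [if_neg hmiss, if_neg hne']
      rw [List.drop_drop]
      congr 2
      omega
  · rw [if_neg hc, if_neg hc, List.drop_drop]

lemma pvStartsB_nil (s : List Char) (i : Nat) (h : ¬ i < s.length) :
    pvStartsB s i = [] := by rw [pvStartsB, dif_neg h]

-- A's result, consuming rem ≠ 0 units starting at offset i, is given by the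
-- offset table from i: the suffix at the rem-th start, or "" when out of range.
lemma pvRecA_eq_starts (s : List Char) :
    ∀ (fuel i : Nat) (rem : Int), s.length - i < fuel → rem ≠ 0 →
      pvRecA fuel (s.drop i) rem =
        if 0 < rem ∧ rem < ((pvStartsB s i).length : Int)
        then s.drop ((pvStartsB s i).getD rem.toNat 0)
        else [] := by
  intro fuel
  induction fuel with
  | zero => intro i rem hf; omega
  | succ fuel ih =>
    intro i rem hf hr
    by_cases hi : i < s.length
    · rw [pvRecA_step s fuel i rem hi hr]
      rw [pvStartsB, dif_pos hi]
      set i' := pvNextB s i with hi'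
      have hgt : i < i' := pvNextB_gt s i hi
      by_cases hr1 : rem = 1
      · subst hr1
        -- rem - 1 = 0: one more unfold of pvRecA
        obtain ⟨g, rfl⟩ : ∃ g, fuel = g + 1 := ⟨fuel - 1, by omega⟩
        by_cases hi2 : i' < s.length
        · have hlen' : ¬ (s.drop i').length = 0 := by simp only [List.length_drop]; omega
          rw [show (1 : Int) - 1 = 0 by norm_num, pvRecA, if_neg hlen', if_pos rfl]
          rw [pvStartsB, dif_pos hi2]
          have hcond : (0:Int) < 1 ∧ (1:Int) < ((i :: i' :: pvStartsB s (pvNextB s i')).length : Int) := by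
            constructor
            · norm_num
            · simp only [List.length_cons]; push_cast; omega
          rw [if_pos hcond]
          simp
        · have hnil : s.drop i' = [] := List.drop_eq_nil_of_le (by omega)
          rw [hnil, pvRecA_nil, pvStartsB_nil s i' hi2]
          have hcond : ¬ ((0:Int) < 1 ∧ (1:Int) < (([i] : List Nat).length : Int)) := by
            simp
          rw [if_neg hcond]
      · rw [ih i' (rem - 1) (by omega) (by omega)]
        by_cases hpos : 0 < rem
        · have hpos' : (0:Int) < rem - 1 := by omega
          have htn : rem.toNat = (rem - 1).toNat + 1 := by omega
          by_cases hlt : rem - 1 < ((pvStartsB s i').length : Int)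
          · rw [if_pos ⟨hpos', hlt⟩]
            have hc2 : (0:Int) < rem ∧ rem < (((i :: pvStartsB s i').length : Nat) : Int) := by
              constructor
              · exact hpos
              · simp only [List.length_cons]; push_cast; omega
            rw [if_pos hc2, htn, List.getD_cons_succ]
          · rw [if_neg (by tauto)]
            have hc2 : ¬ ((0:Int) < rem ∧ rem < (((i :: pvStartsB s i').length : Nat) : Int)) := by
              simp only [List.length_cons]; push_cast; omega
            rw [if_neg hc2]
        · rw [if_neg (by omega), if_neg (by omega)]
    · have hnil : s.drop i = [] := List.drop_eq_nil_of_le (by omega)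
      rw [hnil, pvRecA_nil, pvStartsB_nil s i hi]
      rw [if_neg (by simp; omega)]

-- ===== VERDICT (by name: the statement is the Claim_ definition above) =====
theorem remove_first_chars_of_html_string_spec : Claim_equal_remove_first_chars_of_html_string := by
  intro s n _
  unfold Spec_remove_first_chars_of_html_string remove_first_chars_of_html_string remove_first_chars_of_html_string_alt
  simp only []
  by_cases hn : n = 0
  · subst hn
    rw [if_pos rfl]
    by_cases h0 : s.toList.length = 0
    · have he : s.toList = [] := List.eq_nil_of_length_eq_zero h0
      rw [he, pvRecA_nil]
      have : s = "" := by
        have := congrArg String.ofList he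
        simpa using this
      rw [this]
    · rw [pvRecA, if_neg h0, if_pos rfl]
      simp
  · rw [if_neg hn]
    have := pvRecA_eq_starts s.toList (s.toList.length + 1) 0 n (by omega) hn
    rw [List.drop_zero] at this
    rw [this]
    split_ifs with hc
    · rfl
    · rfl
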